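-- pv_equiv track=rewrite | github.com/saraalrawi/Multi-omics_Biomarker_Discovery- | src/biomarker_discovery/__init__.py | _detect_omics_types
-- ===== SOURCE A (Python) =====
-- from typing import Dict, List, Optional, Tuple, Union, Any, Set
--
-- def _detect_omics_types(feature_names: List[str]) -> Dict[str, List[str]]:
--     """Detect omics types from feature names."""
--     omics_types = {
--         "genomics": [],
--         "transcriptomics": [],
--         "drug_sensitivity": [],
--         "unknown": []
--     }
--
--     for feature in feature_names:
--         feature_lower = feature.lower()
--
--         if any(keyword in feature_lower for keyword in ["mut", "cnv", "genomics"]):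
--             omics_types["genomics"].append(feature)
--         elif any(keyword in feature_lower for keyword in ["expr", "gene", "transcriptomics"]):
--             omics_types["transcriptomics"].append(feature)
--         elif any(keyword in feature_lower for keyword in ["drug", "ic50", "sensitivity"]):
--             omics_types["drug_sensitivity"].append(feature)
--         else:
--             omics_types["unknown"].append(feature)
--
--     # Remove empty categories
--     omics_types = {k: v for k, v in omics_types.items() if v}
--
--     return omics_types
-- ===== SOURCE B (Python) =====
-- RULES = [
--     ("genomics", ("mut", "cnv", "genomics")),
--     ("transcriptomics", ("expr", "gene", "transcriptomics")),
--     ("drug_sensitivity", ("drug", "ic50", "sensitivity")),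
-- ]
-- CATEGORIES = ("genomics", "transcriptomics", "drug_sensitivity", "unknown")
--
--
-- def _category(feature):
--     feature_lower = feature.lower()
--     for cat, keywords in RULES:
--         if any(k in feature_lower for k in keywords):
--             return cat
--     return "unknown"
--
--
-- def _detect_omics_types(feature_names):
--     result = {}
--     for cat in CATEGORIES:
--         members = [f for f in feature_names if _category(f) == cat]
--         if members:
--             result[cat] = members
--     return result
-- ===== Notes on version B (the rewrite author's own statement) =====
-- stated objective: alternative
-- what changed: A makes one feature-major pass appending each feature into a pre-keyed dict and then drops empty entries; B drives classification from an ordered rules table with a first-match classifier and builds the result category-major, filtering the feature list once per category and emitting only non-empty categories.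
import Mathlib
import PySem

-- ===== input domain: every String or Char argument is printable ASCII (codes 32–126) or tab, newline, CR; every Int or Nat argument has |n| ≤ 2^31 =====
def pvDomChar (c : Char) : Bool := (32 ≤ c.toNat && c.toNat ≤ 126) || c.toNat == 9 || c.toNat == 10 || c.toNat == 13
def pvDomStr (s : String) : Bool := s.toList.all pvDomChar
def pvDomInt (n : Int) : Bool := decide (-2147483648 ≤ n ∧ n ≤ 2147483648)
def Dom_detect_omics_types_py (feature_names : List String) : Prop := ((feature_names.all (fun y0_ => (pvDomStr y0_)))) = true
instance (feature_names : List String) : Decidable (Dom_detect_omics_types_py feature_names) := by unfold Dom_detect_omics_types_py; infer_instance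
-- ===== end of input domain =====

-- B restructures A's feature-major dict-appending loop into a category-major pass driven by an
-- ordered rules table (objective: alternative decomposition; same asymptotic cost).

-- ===== PORT A =====
-- literal transliteration of A: a dict with the four keys, one pass over the features
-- appending each to the first matching category, then the dict comprehension dropping empties.
def detect_omics_types_py (feature_names : List String) : List (String × List String) :=
  (feature_names.foldl (fun d feature =>
    let feature_lower := PySem.Str.lower feature
    if ["mut","cnv","genomics"].any (fun k => PySem.Str.isIn k feature_lower) then
      d.modify "genomics" [] (· ++ [feature])
    else if ["expr","gene","transcriptomics"].any (fun k => PySem.Str.isIn k feature_lower) then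
      d.modify "transcriptomics" [] (· ++ [feature])
    else if ["drug","ic50","sensitivity"].any (fun k => PySem.Str.isIn k feature_lower) then
      d.modify "drug_sensitivity" [] (· ++ [feature])
    else
      d.modify "unknown" [] (· ++ [feature]))
    (PySem.Dict.mk [("genomics", []), ("transcriptomics", []), ("drug_sensitivity", []), ("unknown", [])])
  ).items.filter (fun kv => !kv.2.isEmpty)

-- ===== PORT B =====
def pvRules : List (String × List String) :=
  [("genomics", ["mut","cnv","genomics"]),
   ("transcriptomics", ["expr","gene","transcriptomics"]),
   ("drug_sensitivity", ["drug","ic50","sensitivity"])]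

-- the 'for cat, keywords in RULES: … return cat' loop with its 'return "unknown"' fallback
def pvCatGo : List (String × List String) → String → String
  | [], _ => "unknown"
  | (cat, kws) :: rest, fl =>
      if kws.any (fun k => PySem.Str.isIn k fl) then cat else pvCatGo rest fl

def pvCategory (feature : String) : String := pvCatGo pvRules (PySem.Str.lower feature)

def detect_omics_types_py_alt (feature_names : List String) : List (String × List String) :=
  ["genomics","transcriptomics","drug_sensitivity","unknown"].foldl
    (fun result cat =>
      let members := feature_names.filter (fun f => pvCategory f == cat)
      if members.isEmpty then result else result ++ [(cat, members)]) []

-- ===== PRECONDITION & SPEC =====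
def Spec_detect_omics_types_py (feature_names : List String) (out : List (String × List String)) : Prop := out = detect_omics_types_py_alt feature_names
instance (feature_names : List String) (out : List (String × List String)) : Decidable (Spec_detect_omics_types_py feature_names out) := by unfold Spec_detect_omics_types_py; infer_instance

-- ===== CLAIM (what is proved, stated in full; the proofs are below) =====
def Claim_equal_detect_omics_types_py : Prop := ∀ (feature_names : List String), Dom_detect_omics_types_py feature_names → Spec_detect_omics_types_py feature_names (detect_omics_types_py feature_names)

-- ===== LEMMAS AND PROOFS =====

-- B's classifier written as the nested conditions A's branches test
lemma pvCategory_eq (f : String) :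
    pvCategory f =
      (if ["mut","cnv","genomics"].any (fun k => PySem.Str.isIn k (PySem.Str.lower f)) then "genomics"
       else if ["expr","gene","transcriptomics"].any (fun k => PySem.Str.isIn k (PySem.Str.lower f)) then "transcriptomics"
       else if ["drug","ic50","sensitivity"].any (fun k => PySem.Str.isIn k (PySem.Str.lower f)) then "drug_sensitivity"
       else "unknown") := by
  simp [pvCategory, pvRules, pvCatGo]

-- how A's dict.modify acts on the four-key dict, one lemma per key
lemma modify_genomics (g t dr u vs : List String) :
    (PySem.Dict.mk [("genomics", g), ("transcriptomics", t), ("drug_sensitivity", dr), ("unknown", u)]).modify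
      "genomics" [] (· ++ vs)
    = PySem.Dict.mk [("genomics", g ++ vs), ("transcriptomics", t), ("drug_sensitivity", dr), ("unknown", u)] := by
  simp [PySem.Dict.modify, PySem.Dict.insert, PySem.Dict.getD, PySem.Dict.get?, PySem.Dict.contains]

lemma modify_transcriptomics (g t dr u vs : List String) :
    (PySem.Dict.mk [("genomics", g), ("transcriptomics", t), ("drug_sensitivity", dr), ("unknown", u)]).modify
      "transcriptomics" [] (· ++ vs)
    = PySem.Dict.mk [("genomics", g), ("transcriptomics", t ++ vs), ("drug_sensitivity", dr), ("unknown", u)] := by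
  simp [PySem.Dict.modify, PySem.Dict.insert, PySem.Dict.getD, PySem.Dict.get?, PySem.Dict.contains]

lemma modify_drug (g t dr u vs : List String) :
    (PySem.Dict.mk [("genomics", g), ("transcriptomics", t), ("drug_sensitivity", dr), ("unknown", u)]).modify
      "drug_sensitivity" [] (· ++ vs)
    = PySem.Dict.mk [("genomics", g), ("transcriptomics", t), ("drug_sensitivity", dr ++ vs), ("unknown", u)] := by
  simp [PySem.Dict.modify, PySem.Dict.insert, PySem.Dict.getD, PySem.Dict.get?, PySem.Dict.contains]

lemma modify_unknown (g t dr u vs : List String) :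
    (PySem.Dict.mk [("genomics", g), ("transcriptomics", t), ("drug_sensitivity", dr), ("unknown", u)]).modify
      "unknown" [] (· ++ vs)
    = PySem.Dict.mk [("genomics", g), ("transcriptomics", t), ("drug_sensitivity", dr), ("unknown", u ++ vs)] := by
  simp [PySem.Dict.modify, PySem.Dict.insert, PySem.Dict.getD, PySem.Dict.get?, PySem.Dict.contains]

-- A's loop, from an arbitrary state of the four lists, appends exactly B's per-category filters
lemma foldA (fns : List String) (g t dr u : List String) :
    fns.foldl (fun d feature =>
      let feature_lower := PySem.Str.lower feature
      if ["mut","cnv","genomics"].any (fun k => PySem.Str.isIn k feature_lower) then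
        d.modify "genomics" [] (· ++ [feature])
      else if ["expr","gene","transcriptomics"].any (fun k => PySem.Str.isIn k feature_lower) then
        d.modify "transcriptomics" [] (· ++ [feature])
      else if ["drug","ic50","sensitivity"].any (fun k => PySem.Str.isIn k feature_lower) then
        d.modify "drug_sensitivity" [] (· ++ [feature])
      else
        d.modify "unknown" [] (· ++ [feature]))
      (PySem.Dict.mk [("genomics", g), ("transcriptomics", t), ("drug_sensitivity", dr), ("unknown", u)])
    = PySem.Dict.mk
        [("genomics", g ++ fns.filter (fun f => pvCategory f == "genomics")),
         ("transcriptomics", t ++ fns.filter (fun f => pvCategory f == "transcriptomics")),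
         ("drug_sensitivity", dr ++ fns.filter (fun f => pvCategory f == "drug_sensitivity")),
         ("unknown", u ++ fns.filter (fun f => pvCategory f == "unknown"))] := by
  induction fns generalizing g t dr u with
  | nil => simp
  | cons f rest ih =>
    rw [List.foldl_cons]
    show List.foldl _ (if ["mut","cnv","genomics"].any (fun k => PySem.Str.isIn k (PySem.Str.lower f)) then _ else _) rest = _
    by_cases h1 : ["mut","cnv","genomics"].any (fun k => PySem.Str.isIn k (PySem.Str.lower f)) = true
    · have hc : pvCategory f = "genomics" := by rw [pvCategory_eq, if_pos h1]
      rw [if_pos h1, modify_genomics, ih]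
      simp [hc]
    · rw [if_neg h1]
      by_cases h2 : ["expr","gene","transcriptomics"].any (fun k => PySem.Str.isIn k (PySem.Str.lower f)) = true
      · have hc : pvCategory f = "transcriptomics" := by
          rw [pvCategory_eq, if_neg h1, if_pos h2]
        rw [if_pos h2, modify_transcriptomics, ih]
        simp only [List.filter_cons, hc]
        simp
      · rw [if_neg h2]
        by_cases h3 : ["drug","ic50","sensitivity"].any (fun k => PySem.Str.isIn k (PySem.Str.lower f)) = true
        · have hc : pvCategory f = "drug_sensitivity" := by
            rw [pvCategory_eq, if_neg h1, if_neg h2, if_pos h3]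
          rw [if_pos h3, modify_drug, ih]
          simp only [List.filter_cons, hc]
          simp
        · have hc : pvCategory f = "unknown" := by
            rw [pvCategory_eq, if_neg h1, if_neg h2, if_neg h3]
          rw [if_neg h3, modify_unknown, ih]
          simp only [List.filter_cons, hc]
          simp

-- ===== VERDICT (by name: the statement is the Claim_ definition above) =====
theorem detect_omics_types_py_spec : Claim_equal_detect_omics_types_py := by
  intro fns _
  show detect_omics_types_py fns = detect_omics_types_py_alt fns
  unfold detect_omics_types_py detect_omics_types_py_alt
  rw [foldA fns [] [] [] []]
  simp only [List.nil_append, List.foldl_cons, List.foldl_nil]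
  cases hg : (fns.filter (fun f => pvCategory f == "genomics")).isEmpty <;>
  cases ht : (fns.filter (fun f => pvCategory f == "transcriptomics")).isEmpty <;>
  cases hd : (fns.filter (fun f => pvCategory f == "drug_sensitivity")).isEmpty <;>
  cases hu : (fns.filter (fun f => pvCategory f == "unknown")).isEmpty <;>
  simp [hg, ht, hd, hu, List.filter]
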